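-- pv_equiv track=rewrite | github.com/chunlinwu1234/crler-rep-jczx-123 | data_importer.py | auto_map_fields
-- ===== SOURCE A (Python) =====
-- from typing import Dict, List, Optional, Tuple, Any
--
-- def auto_map_fields(source_fields: List[str],
--                    target_fields: List[str]) -> Dict[str, str]:
--     """
--     自动匹配字段
--
--     Args:
--         source_fields: 源字段列表
--         target_fields: 目标字段列表
--
--     Returns:
--         字段映射字典
--     """
--     mapping = {}
--
--     # 精确匹配
--     for source in source_fields:
--         if source in target_fields:
--             mapping[source] = source
--
--     # 模糊匹配（tushare字段名）
--     tushare_mapping = {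
--         'ts_code': 'ts_code',
--         'ann_date': 'ann_date',
--         'end_date': 'report_date',
--         'total_assets': 'total_assets',
--         'total_liab': 'total_liab',
--         'total_hldr_eqy_exc_min_int': 'total_equity',
--         'total_revenue': 'total_revenue',
--         'revenue': 'revenue',
--         'operate_profit': 'operate_profit',
--         'n_income': 'n_income',
--         'n_income_attr_p': 'n_income_attr_p',
--         'eps': 'eps',
--         'roe': 'roe',
--         'roa': 'roa',
--     }
--
--     for source in source_fields:
--         if source not in mapping and source in tushare_mapping:
--             target = tushare_mapping[source]
--             if target in target_fields:
--                 mapping[source] = target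
--
--     return mapping
-- ===== SOURCE B (Python) =====
-- # Different decomposition: dedupe the sources, resolve each one independently to a
-- # ranked candidate (0 = exact, 1 = tushare alias), drop misses, then a single stable
-- # sort by rank puts exact matches before alias matches -- no staged passes, no
-- # "already mapped" bookkeeping.
--
-- _TUSHARE_MAPPING = {
--     'ts_code': 'ts_code',
--     'ann_date': 'ann_date',
--     'end_date': 'report_date',
--     'total_assets': 'total_assets',
--     'total_liab': 'total_liab',
--     'total_hldr_eqy_exc_min_int': 'total_equity',
--     'total_revenue': 'total_revenue',
--     'revenue': 'revenue',
--     'operate_profit': 'operate_profit',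
--     'n_income': 'n_income',
--     'n_income_attr_p': 'n_income_attr_p',
--     'eps': 'eps',
--     'roe': 'roe',
--     'roa': 'roa',
-- }
--
--
-- def auto_map_fields(source_fields, target_fields):
--     targets = set(target_fields)
--
--     def resolve(field):
--         if field in targets:
--             return (0, field)
--         alias = _TUSHARE_MAPPING.get(field)
--         if alias is not None and alias in targets:
--             return (1, alias)
--         return None
--
--     ranked = [(field, resolve(field)) for field in dict.fromkeys(source_fields)]
--     ranked = [(field, r) for field, r in ranked if r is not None]
--     ranked.sort(key=lambda item: item[1][0])
--     return {field: match for field, (_rank, match) in ranked}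
-- ===== Notes on version B (the rewrite author's own statement) =====
-- stated objective: alternative
-- what changed: Instead of A's two staged passes over source_fields with an 'already mapped' guard and linear list scans, B resolves each deduplicated source independently to a ranked candidate ((0, exact) or (1, alias)), filters out misses, and recovers A's exact-before-alias insertion order with one stable sort by rank over set-based lookups.
import Mathlib
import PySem

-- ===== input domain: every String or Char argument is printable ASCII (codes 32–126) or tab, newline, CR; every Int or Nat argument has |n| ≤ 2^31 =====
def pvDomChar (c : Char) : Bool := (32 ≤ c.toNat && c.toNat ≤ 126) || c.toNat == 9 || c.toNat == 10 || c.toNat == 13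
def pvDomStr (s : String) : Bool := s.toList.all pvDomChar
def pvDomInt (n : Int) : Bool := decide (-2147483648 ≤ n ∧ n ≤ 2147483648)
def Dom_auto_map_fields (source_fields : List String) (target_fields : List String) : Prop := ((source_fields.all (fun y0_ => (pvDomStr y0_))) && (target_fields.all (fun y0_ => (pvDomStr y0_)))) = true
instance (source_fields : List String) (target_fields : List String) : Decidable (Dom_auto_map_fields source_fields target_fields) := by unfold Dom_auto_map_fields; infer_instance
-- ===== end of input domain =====

-- B replaces A's two staged passes with their "already mapped" guard by a
-- dedupe / rank-resolve / filter / stable-sort-by-rank pipeline (alternative decomposition).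

-- the literal tushare tAlias dict, shared by both Pythons
def tushare_mapping : PySem.Dict String String :=
  PySem.Dict.ofList [("ts_code","ts_code"),("ann_date","ann_date"),("end_date","report_date"),
    ("total_assets","total_assets"),("total_liab","total_liab"),
    ("total_hldr_eqy_exc_min_int","total_equity"),("total_revenue","total_revenue"),
    ("revenue","revenue"),("operate_profit","operate_profit"),("n_income","n_income"),
    ("n_income_attr_p","n_income_attr_p"),("eps","eps"),("roe","roe"),("roa","roa")]

-- ===== PORT A =====
def auto_map_fields (source_fields : List String) (target_fields : List String) : List (String × String) :=
  -- 精确匹配: first loop, exact matches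
  let mapping : PySem.Dict String String :=
    source_fields.foldl (fun m source =>
      if target_fields.contains source then m.insert source source else m)
      PySem.Dict.empty
  -- 模糊匹配: second loop, tushare aliases for sources not yet mapped
  let mapping :=
    source_fields.foldl (fun m source =>
      if !(m.contains source) && tushare_mapping.contains source then
        match tushare_mapping.get? source with
        | some target => if target_fields.contains target then m.insert source target else m
        | none => m
      else m) mapping
  mapping.items

-- ===== PORT B =====
-- Source B's local closure 'resolve(field)' (captures the target set)
def resolveB (targets : PySem.Set String) (field : String) : Option (Int × String) :=
  if targets.contains field then some (0, field)
  else
    match tushare_mapping.get? field with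
    | some tAlias => if targets.contains tAlias then some (1, tAlias) else none
    | none => none

def auto_map_fields_alt (source_fields : List String) (target_fields : List String) : List (String × String) :=
  let targets : PySem.Set String := PySem.Set.ofList target_fields
  -- ranked = [(field, resolve(field)) for field in dict.fromkeys(source_fields)]
  let ranked := (PySem.List.dedup source_fields).map (fun field => (field, resolveB targets field))
  -- ranked = [(field, r) for field, r in ranked if r is not None]
  let ranked := ranked.filterMap (fun p => p.2.map (fun r => (p.1, r)))
  -- ranked.sort(key=lambda item: item[1][0])   (stable)
  let ranked := PySem.List.sorted ranked (fun item => item.2.1) false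
  -- {field: match for field, (_rank, match) in ranked}
  (PySem.Dict.ofList (ranked.map (fun p => (p.1, p.2.2)))).items

-- ===== PRECONDITION & SPEC =====
def Spec_auto_map_fields (source_fields : List String) (target_fields : List String) (out : List (String × String)) : Prop := out = auto_map_fields_alt source_fields target_fields
instance (source_fields : List String) (target_fields : List String) (out : List (String × String)) : Decidable (Spec_auto_map_fields source_fields target_fields out) := by unfold Spec_auto_map_fields; infer_instance

-- ===== CLAIM (what is proved, stated in full; the proofs are below) =====
def Claim_equal_auto_map_fields : Prop := ∀ (source_fields : List String) (target_fields : List String), Dom_auto_map_fields source_fields target_fields → Spec_auto_map_fields source_fields target_fields (auto_map_fields source_fields target_fields)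

-- ===== LEMMAS AND PROOFS =====

-- A-side abstractions: the pairs appended by A's first loop (seen = exact keys so far)
def exA (tgt : List String) : List String → List String → List (String × String)
  | _, [] => []
  | seen, s :: r =>
    if s ∈ tgt then
      if s ∈ seen then exA tgt seen r else (s, s) :: exA tgt (seen ++ [s]) r
    else exA tgt seen r

-- the pairs appended by A's second loop (seen = all keys of the dict so far)
def fzA (tgt : List String) : List String → List String → List (String × String)
  | _, [] => []
  | seen, s :: r =>
    if s ∈ seen then fzA tgt seen r
    else
      match tushare_mapping.get? s with
      | some t => if t ∈ tgt then (s, t) :: fzA tgt (seen ++ [s]) r else fzA tgt seen r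
      | none => fzA tgt seen r

-- common abstraction of both sides over a seen-relative dedup traversal
def exF (tgt : List String) : List String → List String → List (String × String)
  | _, [] => []
  | seen, s :: r =>
    if s ∈ seen then exF tgt seen r
    else if s ∈ tgt then (s, s) :: exF tgt (seen ++ [s]) r
    else exF tgt (seen ++ [s]) r

def fzF (tgt : List String) : List String → List String → List (String × String)
  | _, [] => []
  | seen, s :: r =>
    if s ∈ seen then fzF tgt seen r
    else if s ∈ tgt then fzF tgt (seen ++ [s]) r
    else
      match tushare_mapping.get? s with
      | some t => if t ∈ tgt then (s, t) :: fzF tgt (seen ++ [s]) r else fzF tgt (seen ++ [s]) r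
      | none => fzF tgt (seen ++ [s]) r

-- seen-relative dedup (the trace of dict.fromkeys)
def dd : List String → List String → List String
  | _, [] => []
  | seen, s :: r => if s ∈ seen then dd seen r else s :: dd (seen ++ [s]) r

lemma loop1_items (tgt : List String) :
    ∀ (l : List String) (m : PySem.Dict String String),
      (∀ p ∈ m.items, p.2 = p.1) →
      (l.foldl (fun m s => if tgt.contains s then m.insert s s else m) m).items
        = m.items ++ exA tgt (m.items.map Prod.fst) l := by
  intro l
  induction l with
  | nil => intro m _; simp [exA]
  | cons s r ih =>
    intro m hinv
    simp only [List.foldl_cons, exA]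
    by_cases hs : s ∈ tgt
    · rw [List.contains_eq_mem, if_pos (by simp [hs])]
      by_cases hm : s ∈ m.items.map Prod.fst
      · have hc : m.contains s = true := by
          simp only [PySem.Dict.contains, List.any_eq_true]
          obtain ⟨p, hp, hps⟩ := List.mem_map.mp hm
          exact ⟨p, hp, by simp [hps]⟩
        have hid : m.insert s s = m := by
          apply PySem.Dict.ext
          rw [PySem.Dict.items_insert_of_contains m s hc]
          have hptw : ∀ p ∈ m.items, (if (p.1 == s) = true then (s, s) else p) = p := by
            intro p hp
            obtain ⟨a, b⟩ := p
            have hv : b = a := hinv (a, b) hp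
            subst hv
            by_cases hak : b = s
            · subst hak; simp
            · simp [hak]
          rw [List.map_congr_left hptw]
          simp
        rw [hid, ih m hinv]
        simp [hs, hm]
      · have hc : m.contains s = false := by
          simp only [PySem.Dict.contains, List.any_eq_false]
          intro p hp hps
          exact hm (List.mem_map.mpr ⟨p, hp, by simpa using hps⟩)
        have hitems := PySem.Dict.items_insert_of_not_contains m (k := s) s hc
        have hinv' : ∀ p ∈ (m.insert s s).items, p.2 = p.1 := by
          rw [hitems]; intro p hp
          rcases List.mem_append.mp hp with h | h
          · exact hinv p h
          · simp at h; simp [h]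
        rw [ih (m.insert s s) hinv', hitems]
        simp [hs, hm, List.append_assoc]
    · rw [List.contains_eq_mem, if_neg (by simp [hs])]
      rw [ih m hinv]
      simp [hs]

lemma loop2_items (tgt : List String) :
    ∀ (l : List String) (m : PySem.Dict String String),
      (l.foldl (fun m s =>
          if !(m.contains s) && tushare_mapping.contains s then
            match tushare_mapping.get? s with
            | some t => if tgt.contains t then m.insert s t else m
            | none => m
          else m) m).items
        = m.items ++ fzA tgt (m.items.map Prod.fst) l := by
  intro l
  induction l with
  | nil => intro m; simp [fzA]
  | cons s r ih =>
    intro m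
    simp only [List.foldl_cons, fzA]
    by_cases hm : s ∈ m.items.map Prod.fst
    · have hc : m.contains s = true := by
        simp only [PySem.Dict.contains, List.any_eq_true]
        obtain ⟨p, hp, hps⟩ := List.mem_map.mp hm
        exact ⟨p, hp, by simp [hps]⟩
      rw [if_neg (by simp [hc])]
      rw [ih m]; simp [hm]
    · have hc : m.contains s = false := by
        simp only [PySem.Dict.contains, List.any_eq_false]
        intro p hp hps
        exact hm (List.mem_map.mpr ⟨p, hp, by simpa using hps⟩)
      have hcs : tushare_mapping.contains s = (tushare_mapping.get? s).isSome :=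
        PySem.Dict.contains_eq_isSome_get? _ _
      cases hg : tushare_mapping.get? s with
      | none =>
        rw [if_neg (by simp [hc, hcs, hg])]
        rw [ih m]; simp [hm]
      | some t =>
        rw [if_pos (by simp [hc, hcs, hg])]
        simp only []
        by_cases ht : t ∈ tgt
        · rw [List.contains_eq_mem, if_pos (by simp [ht])]
          have hitems := PySem.Dict.items_insert_of_not_contains m (k := s) t hc
          rw [ih (m.insert s t), hitems]
          simp [hm, ht, List.append_assoc]
        · rw [List.contains_eq_mem, if_neg (by simp [ht])]
          rw [ih m]
          simp [hm, ht]

lemma exA_keys_mem_tgt (tgt : List String) :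
    ∀ (l seen : List String) (k : String), k ∈ (exA tgt seen l).map Prod.fst → k ∈ tgt := by
  intro l
  induction l with
  | nil => intro seen k h; simp [exA] at h
  | cons s r ih =>
    intro seen k h
    simp only [exA] at h
    by_cases hs : s ∈ tgt
    · simp only [hs, if_true] at h
      by_cases hseen : s ∈ seen
      · simp only [hseen, if_true] at h; exact ih seen k h
      · simp only [hseen, if_false, List.map_cons, List.mem_cons] at h
        rcases h with h | h
        · simpa [h] using hs
        · exact ih (seen ++ [s]) k h
    · simp only [hs, if_false] at h; exact ih seen k h

lemma exA_keys_complete (tgt : List String) :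
    ∀ (l seen : List String) (s : String), s ∈ l → s ∈ tgt →
      s ∈ seen ∨ s ∈ (exA tgt seen l).map Prod.fst := by
  intro l
  induction l with
  | nil => intro seen s h; simp at h
  | cons a r ih =>
    intro seen s hmem hs
    simp only [exA]
    rcases List.mem_cons.mp hmem with rfl | hmem
    · simp only [hs, if_true]
      by_cases hseen : s ∈ seen
      · exact Or.inl hseen
      · simp [hseen]
    · by_cases ha : a ∈ tgt
      · simp only [ha, if_true]
        by_cases hseen : a ∈ seen
        · simp only [hseen, if_true]; exact ih seen s hmem hs
        · simp only [hseen, if_false, List.map_cons, List.mem_cons]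
          rcases ih (seen ++ [a]) s hmem hs with h | h
          · rcases List.mem_append.mp h with h | h
            · exact Or.inl h
            · simp at h; right; left; exact h
          · right; right; exact h
      · simp only [ha, if_false]; exact ih seen s hmem hs

lemma bridge_exact (tgt : List String) :
    ∀ (l seenA seenB : List String),
      (∀ s ∈ l, s ∈ tgt → (s ∈ seenA ↔ s ∈ seenB)) →
      exA tgt seenA l = exF tgt seenB l := by
  intro l
  induction l with
  | nil => intro _ _ _; simp [exA, exF]
  | cons s r ih =>
    intro seenA seenB hrel
    have hrel_r : ∀ s' ∈ r, s' ∈ tgt → (s' ∈ seenA ↔ s' ∈ seenB) :=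
      fun s' h => hrel s' (List.mem_cons_of_mem _ h)
    simp only [exA, exF]
    by_cases hs : s ∈ tgt
    · have hiff := hrel s (List.mem_cons_self ..) hs
      by_cases hA : s ∈ seenA
      · have hB : s ∈ seenB := hiff.mp hA
        simp only [hs, hA, hB, if_true]
        exact ih seenA seenB hrel_r
      · have hB : s ∉ seenB := fun h => hA (hiff.mpr h)
        simp only [hs, hA, hB, if_true, if_false]
        refine congrArg _ (ih (seenA ++ [s]) (seenB ++ [s]) ?_)
        intro s' h' ht'
        constructor <;> intro hm <;> rcases List.mem_append.mp hm with h | h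
        · exact List.mem_append.mpr (Or.inl ((hrel_r s' h' ht').mp h))
        · exact List.mem_append.mpr (Or.inr h)
        · exact List.mem_append.mpr (Or.inl ((hrel_r s' h' ht').mpr h))
        · exact List.mem_append.mpr (Or.inr h)
    · simp only [hs, if_false]
      by_cases hB : s ∈ seenB
      · simp only [hB, if_true]; exact ih seenA seenB hrel_r
      · simp only [hB, if_false]
        refine ih seenA (seenB ++ [s]) ?_
        intro s' h' ht'
        have hne : s' ≠ s := fun h => hs (h ▸ ht')
        rw [hrel_r s' h' ht']
        simp [hne]

lemma bridge_fuzzy (tgt : List String) :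
    ∀ (l seenA seenB : List String),
      (∀ s ∈ l, s ∈ tgt → s ∈ seenA) →
      (∀ s ∈ l, s ∉ tgt → ∀ t, tushare_mapping.get? s = some t → t ∈ tgt →
        (s ∈ seenA ↔ s ∈ seenB)) →
      fzA tgt seenA l = fzF tgt seenB l := by
  intro l
  induction l with
  | nil => intro _ _ _ _; simp [fzA, fzF]
  | cons s r ih =>
    intro seenA seenB h1 h2
    have h1r : ∀ s' ∈ r, s' ∈ tgt → s' ∈ seenA :=
      fun s' h => h1 s' (List.mem_cons_of_mem _ h)
    have h2r : ∀ s' ∈ r, s' ∉ tgt → ∀ t, tushare_mapping.get? s' = some t → t ∈ tgt →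
        (s' ∈ seenA ↔ s' ∈ seenB) :=
      fun s' h => h2 s' (List.mem_cons_of_mem _ h)
    simp only [fzA, fzF]
    by_cases hs : s ∈ tgt
    · -- exact-matched source: already a key on the A side, skipped via the tgt test on the B side
      have hA : s ∈ seenA := h1 s (List.mem_cons_self ..) hs
      simp only [hA, if_true]
      by_cases hB : s ∈ seenB
      · simp only [hB, if_true]; exact ih seenA seenB h1r h2r
      · simp only [hB, hs, if_false, if_true]
        refine ih seenA (seenB ++ [s]) h1r ?_
        intro s' h' ht' t hg htt
        have hne : s' ≠ s := fun h => ht' (h ▸ hs)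
        rw [h2r s' h' ht' t hg htt]
        simp [hne]
    · cases hg : tushare_mapping.get? s with
      | none =>
        -- unmatched source: no output on either side
        by_cases hA : s ∈ seenA
        · simp only [hA, if_true]
          by_cases hB : s ∈ seenB
          · simp only [hB, if_true]; exact ih seenA seenB h1r h2r
          · simp only [hB, hs, if_false]
            refine ih seenA (seenB ++ [s]) h1r ?_
            intro s' h' ht' t hg' htt
            have hne : s' ≠ s := by
              intro h; subst h; rw [hg] at hg'; simp at hg'
            rw [h2r s' h' ht' t hg' htt]
            simp [hne]
        · simp only [hA, if_false]
          by_cases hB : s ∈ seenB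
          · simp only [hB, if_true]; exact ih seenA seenB h1r h2r
          · simp only [hB, hs, if_false]
            refine ih seenA (seenB ++ [s]) h1r ?_
            intro s' h' ht' t hg' htt
            have hne : s' ≠ s := by
              intro h; subst h; rw [hg] at hg'; simp at hg'
            rw [h2r s' h' ht' t hg' htt]
            simp [hne]
      | some t =>
        by_cases htt : t ∈ tgt
        · -- fuzzy-matchable source: the seen sets agree on it
          have hiff := h2 s (List.mem_cons_self ..) hs t hg htt
          by_cases hA : s ∈ seenA
          · have hB : s ∈ seenB := hiff.mp hA
            simp only [hA, hB, if_true]; exact ih seenA seenB h1r h2r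
          · have hB : s ∉ seenB := fun h => hA (hiff.mpr h)
            simp only [hA, hB, hs, hg, htt, if_false, if_true]
            refine congrArg _ (ih (seenA ++ [s]) (seenB ++ [s]) ?_ ?_)
            · intro s' h' ht'; exact List.mem_append.mpr (Or.inl (h1r s' h' ht'))
            · intro s' h' ht' t' hg' htt'
              simp [List.mem_append, h2r s' h' ht' t' hg' htt']
        · -- tAlias not in targets: no output on either side
          by_cases hA : s ∈ seenA
          · simp only [hA, if_true]
            by_cases hB : s ∈ seenB
            · simp only [hB, if_true]; exact ih seenA seenB h1r h2r
            · simp only [hB, hs, hg, htt, if_false]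
              refine ih seenA (seenB ++ [s]) h1r ?_
              intro s' h' ht' t' hg' htt'
              have hne : s' ≠ s := by
                intro h; subst h; rw [hg] at hg'
                cases hg'; exact htt htt'
              rw [h2r s' h' ht' t' hg' htt']
              simp [hne]
          · simp only [hA, hg, htt, if_false]
            by_cases hB : s ∈ seenB
            · simp only [hB, if_true]; exact ih seenA seenB h1r h2r
            · simp only [hB, hs, hg, htt, if_false]
              refine ih seenA (seenB ++ [s]) h1r ?_
              intro s' h' ht' t' hg' htt'
              have hne : s' ≠ s := by
                intro h; subst h; rw [hg] at hg'
                cases hg'; exact htt htt'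
              rw [h2r s' h' ht' t' hg' htt']
              simp [hne]

lemma exF_keys (tgt : List String) :
    ∀ (l seen : List String),
      ((exF tgt seen l).map Prod.fst).Nodup ∧
      (∀ k ∈ (exF tgt seen l).map Prod.fst, k ∉ seen ∧ k ∈ tgt) := by
  intro l
  induction l with
  | nil => intro seen; simp [exF]
  | cons s r ih =>
    intro seen
    simp only [exF]
    by_cases hseen : s ∈ seen
    · simpa [hseen] using ih seen
    · by_cases hs : s ∈ tgt
      · simp only [hseen, hs, if_false, if_true, List.map_cons]
        obtain ⟨hnd, hmem⟩ := ih (seen ++ [s])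
        refine ⟨List.nodup_cons.mpr ⟨?_, hnd⟩, ?_⟩
        · intro h
          exact (hmem s h).1 (List.mem_append.mpr (Or.inr (by simp)))
        · intro k hk
          rcases List.mem_cons.mp hk with rfl | hk
          · exact ⟨hseen, hs⟩
          · exact ⟨fun h => (hmem k hk).1 (List.mem_append.mpr (Or.inl h)), (hmem k hk).2⟩
      · simp only [hseen, hs, if_false]
        obtain ⟨hnd, hmem⟩ := ih (seen ++ [s])
        exact ⟨hnd, fun k hk =>
          ⟨fun h => (hmem k hk).1 (List.mem_append.mpr (Or.inl h)), (hmem k hk).2⟩⟩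

lemma fzF_keys (tgt : List String) :
    ∀ (l seen : List String),
      ((fzF tgt seen l).map Prod.fst).Nodup ∧
      (∀ k ∈ (fzF tgt seen l).map Prod.fst, k ∉ seen ∧ k ∉ tgt) := by
  intro l
  induction l with
  | nil => intro seen; simp [fzF]
  | cons s r ih =>
    intro seen
    simp only [fzF]
    by_cases hseen : s ∈ seen
    · simpa [hseen] using ih seen
    · by_cases hs : s ∈ tgt
      · simp only [hseen, hs, if_false, if_true]
        obtain ⟨hnd, hmem⟩ := ih (seen ++ [s])
        exact ⟨hnd, fun k hk =>
          ⟨fun h => (hmem k hk).1 (List.mem_append.mpr (Or.inl h)), (hmem k hk).2⟩⟩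
      · simp only [hseen, hs, if_false]
        cases hg : tushare_mapping.get? s with
        | none =>
          obtain ⟨hnd, hmem⟩ := ih (seen ++ [s])
          exact ⟨hnd, fun k hk =>
            ⟨fun h => (hmem k hk).1 (List.mem_append.mpr (Or.inl h)), (hmem k hk).2⟩⟩
        | some t =>
          by_cases ht : t ∈ tgt
          · simp only [ht, if_true, List.map_cons]
            obtain ⟨hnd, hmem⟩ := ih (seen ++ [s])
            refine ⟨List.nodup_cons.mpr ⟨?_, hnd⟩, ?_⟩
            · intro h
              exact (hmem s h).1 (List.mem_append.mpr (Or.inr (by simp)))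
            · intro k hk
              rcases List.mem_cons.mp hk with rfl | hk
              · exact ⟨hseen, hs⟩
              · exact ⟨fun h => (hmem k hk).1 (List.mem_append.mpr (Or.inl h)), (hmem k hk).2⟩
          · simp only [ht, if_false]
            obtain ⟨hnd, hmem⟩ := ih (seen ++ [s])
            exact ⟨hnd, fun k hk =>
              ⟨fun h => (hmem k hk).1 (List.mem_append.mpr (Or.inl h)), (hmem k hk).2⟩⟩

-- ===== B-side lemmas: the pipeline computes exF ++ fzF =====

lemma foldl_add_eq_dd : ∀ (l s : List String), l.foldl PySem.Set.add s = s ++ dd s l := by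
  intro l
  induction l with
  | nil => intro s; simp [dd]
  | cons x r ih =>
    intro s
    rw [List.foldl_cons]
    by_cases hx : x ∈ (s : List String)
    · have : PySem.Set.add s x = s := by
        simp [PySem.Set.add, PySem.Set.contains, List.contains_eq_mem, hx]
      rw [this, ih s]
      simp [dd, hx]
    · have : PySem.Set.add s x = s ++ [x] := by
        simp [PySem.Set.add, PySem.Set.contains, List.contains_eq_mem, hx]
      rw [this, ih (s ++ [x])]
      simp [dd, hx]

lemma dedup_eq_dd (l : List String) : PySem.List.dedup l = dd [] l := by
  rw [PySem.List.dedup_eq_ofList, PySem.Set.ofList_eq_foldl, foldl_add_eq_dd]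
  simp

lemma contains_ofList (tgt : List String) (f : String) :
    (PySem.Set.ofList tgt).contains f = decide (f ∈ tgt) := by
  simp [PySem.Set.contains, List.contains_eq_mem, PySem.Set.mem_ofList]

-- the candidate stream over the dedup trace
def rankedOf (tgt : List String) (l : List String) : List (String × Int × String) :=
  l.filterMap (fun f => (resolveB (PySem.Set.ofList tgt) f).map (fun r => (f, r)))

lemma rankedOf_keys01 (tgt l : List String) :
    ∀ x ∈ rankedOf tgt l, x.2.1 = 0 ∨ x.2.1 = 1 := by
  intro x hx
  obtain ⟨f, _, hf⟩ := List.mem_filterMap.mp hx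
  obtain ⟨r, hr, hxeq⟩ := Option.map_eq_some_iff.mp hf
  subst hxeq
  unfold resolveB at hr
  split at hr
  · cases hr; simp
  · split at hr
    · split at hr
      · cases hr; simp
      · simp at hr
    · simp at hr

lemma rank0_part (tgt : List String) :
    ∀ (l seen : List String),
      ((rankedOf tgt (dd seen l)).filter (fun p => p.2.1 == 0)).map (fun p => (p.1, p.2.2))
        = exF tgt seen l := by
  intro l
  induction l with
  | nil => intro seen; simp [dd, rankedOf, exF]
  | cons s r ih =>
    intro seen
    simp only [dd, exF]
    by_cases hseen : s ∈ seen
    · simp only [hseen, if_true]; exact ih seen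
    · simp only [hseen, if_false]
      by_cases hs : s ∈ tgt
      · have hres : resolveB (PySem.Set.ofList tgt) s = some (0, s) := by
          unfold resolveB
          rw [if_pos (by rw [contains_ofList]; simp [hs])]
        simp only [hs, if_true, rankedOf, List.filterMap_cons, hres, Option.map_some]
        rw [← rankedOf]
        simp only [List.filter_cons]
        norm_num
        exact ih (seen ++ [s])
      · simp only [hs, if_false]
        cases hg : tushare_mapping.get? s with
        | none =>
          have hres : resolveB (PySem.Set.ofList tgt) s = none := by
            unfold resolveB
            rw [if_neg (by rw [contains_ofList]; simp [hs])]
            simp [hg]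
          simp only [rankedOf, List.filterMap_cons, hres, Option.map_none]
          rw [← rankedOf]
          exact ih (seen ++ [s])
        | some t =>
          by_cases ht : t ∈ tgt
          · have hres : resolveB (PySem.Set.ofList tgt) s = some (1, t) := by
              unfold resolveB
              rw [if_neg (by rw [contains_ofList]; simp [hs])]
              simp [hg, contains_ofList, ht]
            simp only [rankedOf, List.filterMap_cons, hres, Option.map_some]
            rw [← rankedOf]
            simp only [List.filter_cons]
            norm_num
            exact ih (seen ++ [s])
          · have hres : resolveB (PySem.Set.ofList tgt) s = none := by
              unfold resolveB
              rw [if_neg (by rw [contains_ofList]; simp [hs])]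
              simp [hg, contains_ofList, ht]
            simp only [rankedOf, List.filterMap_cons, hres, Option.map_none]
            rw [← rankedOf]
            exact ih (seen ++ [s])

lemma rank1_part (tgt : List String) :
    ∀ (l seen : List String),
      ((rankedOf tgt (dd seen l)).filter (fun p => !(p.2.1 == 0))).map (fun p => (p.1, p.2.2))
        = fzF tgt seen l := by
  intro l
  induction l with
  | nil => intro seen; simp [dd, rankedOf, fzF]
  | cons s r ih =>
    intro seen
    simp only [dd, fzF]
    by_cases hseen : s ∈ seen
    · simp only [hseen, if_true]; exact ih seen
    · simp only [hseen, if_false]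
      by_cases hs : s ∈ tgt
      · have hres : resolveB (PySem.Set.ofList tgt) s = some (0, s) := by
          unfold resolveB
          rw [if_pos (by rw [contains_ofList]; simp [hs])]
        simp only [hs, if_true, rankedOf, List.filterMap_cons, hres, Option.map_some]
        rw [← rankedOf]
        simp only [List.filter_cons]
        norm_num
        exact ih (seen ++ [s])
      · simp only [hs, if_false]
        cases hg : tushare_mapping.get? s with
        | none =>
          have hres : resolveB (PySem.Set.ofList tgt) s = none := by
            unfold resolveB
            rw [if_neg (by rw [contains_ofList]; simp [hs])]
            simp [hg]
          simp only [rankedOf, List.filterMap_cons, hres, Option.map_none]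
          rw [← rankedOf]
          exact ih (seen ++ [s])
        | some t =>
          by_cases ht : t ∈ tgt
          · have hres : resolveB (PySem.Set.ofList tgt) s = some (1, t) := by
              unfold resolveB
              rw [if_neg (by rw [contains_ofList]; simp [hs])]
              simp [hg, contains_ofList, ht]
            simp only [rankedOf, List.filterMap_cons, hres, Option.map_some]
            rw [← rankedOf]
            simp only [List.filter_cons]
            norm_num
            rw [if_pos ht]
            exact congrArg _ (ih (seen ++ [s]))
          · have hres : resolveB (PySem.Set.ofList tgt) s = none := by
              unfold resolveB
              rw [if_neg (by rw [contains_ofList]; simp [hs])]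
              simp [hg, contains_ofList, ht]
            simp only [rankedOf, List.filterMap_cons, hres, Option.map_none]
            rw [← rankedOf]
            rw [if_neg ht]
            exact ih (seen ++ [s])

-- stable sort on a two-valued key is the partition
lemma insertBy_middle {α : Type} (before : α → α → Bool) (x : α) :
    ∀ (A B : List α), (∀ y ∈ A, before x y = false) → (∀ y ∈ B, before x y = true) →
      PySem.List.insertBy before x (A ++ B) = A ++ x :: B := by
  intro A
  induction A with
  | nil =>
    intro B _ hB
    cases B with
    | nil => simp [PySem.List.insertBy]
    | cons b bs =>
      simp only [List.nil_append, PySem.List.insertBy]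
      rw [hB b (by simp)]
      simp
  | cons a A' ih =>
    intro B hA hB
    simp only [List.cons_append, PySem.List.insertBy]
    rw [hA a (by simp)]
    simp only [Bool.false_eq_true, if_false]
    rw [ih B (fun y hy => hA y (by simp [hy])) hB]

lemma foldl_insertBy_partition {α : Type} (key : α → Int) :
    ∀ (xs A B : List α), (∀ y ∈ A, key y = 0) → (∀ y ∈ B, key y = 1) →
      (∀ x ∈ xs, key x = 0 ∨ key x = 1) →
      xs.foldl (fun acc x => PySem.List.insertBy (fun a b => decide (key a < key b)) x acc) (A ++ B)
        = (A ++ xs.filter (fun x => key x == 0)) ++ (B ++ xs.filter (fun x => !(key x == 0))) := by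
  intro xs
  induction xs with
  | nil => intro A B _ _ _; simp
  | cons x r ih =>
    intro A B hA hB hx
    rw [List.foldl_cons]
    rcases hx x (by simp) with h0 | h1
    · have hstep : PySem.List.insertBy (fun a b => decide (key a < key b)) x (A ++ B)
          = (A ++ [x]) ++ B := by
        rw [insertBy_middle _ x A B
          (fun y hy => by simp [hA y hy, h0])
          (fun y hy => by simp [hB y hy, h0])]
        simp
      rw [hstep, ih (A ++ [x]) B
        (by intro y hy; rcases List.mem_append.mp hy with h | h
            · exact hA y h
            · simp at h; simp [h, h0])
        hB (fun y hy => hx y (by simp [hy]))]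
      simp [List.filter_cons, h0, List.append_assoc]
    · have hstep : PySem.List.insertBy (fun a b => decide (key a < key b)) x (A ++ B)
          = A ++ (B ++ [x]) := by
        have hfalse : ∀ y ∈ A ++ B, (fun a b => decide (key a < key b)) x y = false := by
          intro y hy
          rcases List.mem_append.mp hy with h | h
          · simp only [hA y h, h1]; decide
          · simp only [hB y h, h1]; decide
        rw [PySem.List.insertBy_of_forall_not_before _ x (A ++ B) hfalse]
        simp
      rw [hstep, ih A (B ++ [x]) hA
        (by intro y hy; rcases List.mem_append.mp hy with h | h
            · exact hB y h
            · simp at h; simp [h, h1])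
        (fun y hy => hx y (by simp [hy]))]
      simp [List.filter_cons, h1, List.append_assoc]

lemma sorted_two_ranks {α : Type} (key : α → Int) (xs : List α)
    (h : ∀ x ∈ xs, key x = 0 ∨ key x = 1) :
    PySem.List.sorted xs key false
      = xs.filter (fun x => key x == 0) ++ xs.filter (fun x => !(key x == 0)) := by
  rw [PySem.List.sorted_eq_foldl_insertBy]
  have := foldl_insertBy_partition key xs [] [] (by simp) (by simp) h
  simpa using this

-- ===== VERDICT (by name: the statement is the Claim_ definition above) =====
theorem auto_map_fields_spec : Claim_equal_auto_map_fields := by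
  intro src tgt _
  unfold Spec_auto_map_fields auto_map_fields auto_map_fields_alt
  simp only []
  -- A side
  have hA1 := loop1_items tgt src PySem.Dict.empty (by intro p hp; simp [PySem.Dict.empty] at hp)
  have hempty : (PySem.Dict.empty : PySem.Dict String String).items = [] := rfl
  rw [hempty] at hA1
  simp only [List.nil_append, List.map_nil] at hA1
  set m1 := src.foldl (fun m s => if tgt.contains s then m.insert s s else m)
    (PySem.Dict.empty : PySem.Dict String String) with hm1
  have hA2 := loop2_items tgt src m1
  -- bridges to the common abstraction
  have hex : exA tgt [] src = exF tgt [] src :=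
    bridge_exact tgt src [] [] (by intro s _ _; exact Iff.rfl)
  have hfz : fzA tgt ((exA tgt [] src).map Prod.fst) src = fzF tgt [] src := by
    apply bridge_fuzzy
    · intro s hs hst
      rcases exA_keys_complete tgt src [] s hs hst with h | h
      · simp at h
      · exact h
    · intro s _ hst t _ _
      constructor
      · intro h; exact absurd (exA_keys_mem_tgt tgt src [] s h) hst
      · intro h; simp at h
  -- B side: the pipeline equals exF ++ fzF
  have hranked : List.filterMap (fun p => p.2.map (fun r => (p.1, r)))
        ((PySem.List.dedup src).map (fun field => (field, resolveB (PySem.Set.ofList tgt) field)))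
        = rankedOf tgt (dd [] src) := by
    rw [List.filterMap_map, dedup_eq_dd]
    rfl
  have hsort := sorted_two_ranks (fun (item : String × Int × String) => item.2.1)
    (rankedOf tgt (dd [] src)) (rankedOf_keys01 tgt (dd [] src))
  have hmap : (PySem.List.sorted (rankedOf tgt (dd [] src))
        (fun item => item.2.1) false).map (fun p => (p.1, p.2.2))
      = exF tgt [] src ++ fzF tgt [] src := by
    rw [hsort, List.map_append, rank0_part tgt src [], rank1_part tgt src []]
  -- dict comprehension: keys are distinct, so items = the list
  obtain ⟨hexnd, hexmem⟩ := exF_keys tgt src []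
  obtain ⟨hfznd, hfzmem⟩ := fzF_keys tgt src []
  have hnd : ((exF tgt [] src ++ fzF tgt [] src).map Prod.fst).Nodup := by
    rw [List.map_append, List.nodup_append]
    exact ⟨hexnd, hfznd, fun a ha b hb hab => (hfzmem b hb).2 (hab ▸ (hexmem a ha).2)⟩
  have hfresh : ∀ p ∈ exF tgt [] src ++ fzF tgt [] src,
      (PySem.Dict.empty : PySem.Dict String String).contains p.1 = false := by
    intro p _; exact PySem.Dict.contains_empty _
  have hofl : (PySem.Dict.ofList (exF tgt [] src ++ fzF tgt [] src)).items
      = exF tgt [] src ++ fzF tgt [] src := by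
    unfold PySem.Dict.ofList PySem.Dict.update
    rw [PySem.Dict.items_foldl_insert_fresh (exF tgt [] src ++ fzF tgt [] src)
      Prod.fst Prod.snd PySem.Dict.empty hfresh hnd]
    simp [hempty]
  rw [hranked, hmap, hofl, hA2, hA1, hfz, hex]
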